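-- pv_equiv track=rewrite | github.com/zhangxiao318/PilotCode | swe_bench_test/run_pilotcode_harness.py | strip_test_file_changes
-- ===== SOURCE A (Python) =====
-- def strip_test_file_changes(patch: str) -> str:
--     """Remove diff hunks for test files from a patch.
--
--     SWE-bench applies its own test_patch after the model_patch. If the model
--     patch also modifies test files, the test_patch may fail to apply due to
--     conflicts. Stripping test file changes ensures clean eval.
--     """
--     if not patch or not patch.strip():
--         return patch
--     lines = patch.split("\n")
--     result = []
--     in_test_hunk = False
--     i = 0
--     while i < len(lines):
--         line = lines[i]
--         if line.startswith("diff --git a/"):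
--             # Determine file path from the b/ prefix
--             parts = line.split()
--             filepath = ""
--             for j, part in enumerate(parts):
--                 if part.startswith("b/"):
--                     filepath = part[2:]
--                     break
--             in_test_hunk = (
--                 "/tests/" in filepath or "/test_" in filepath or filepath.startswith("tests/")
--             )
--             if not in_test_hunk:
--                 result.append(line)
--             i += 1
--             # Skip index line if present
--             if i < len(lines) and lines[i].startswith("index "):
--                 if not in_test_hunk:
--                     result.append(lines[i])
--                 i += 1
--             continue
--         if not in_test_hunk:
--             result.append(line)
--         i += 1
--     cleaned = "\n".join(result).strip()
--     if cleaned and not cleaned.endswith("\n"):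
--         cleaned += "\n"
--     return cleaned
-- ===== SOURCE B (Python) =====
-- def strip_test_file_changes(patch: str) -> str:
--     """Remove diff hunks for test files from a patch (block-based rewrite)."""
--     if not patch or not patch.strip():
--         return patch
--     lines = patch.split("\n")
--     # Split into blocks: a leading preamble block, then one block per
--     # "diff --git a/" header line.
--     blocks = []
--     cur = []
--     for line in lines:
--         if line.startswith("diff --git a/"):
--             blocks.append(cur)
--             cur = [line]
--         else:
--             cur.append(line)
--     blocks.append(cur)
--     # Keep the preamble and every block whose target path is not a test file.
--     kept = []
--     for b in blocks:
--         if b and b[0].startswith("diff --git a/"):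
--             filepath = next((p[2:] for p in b[0].split() if p.startswith("b/")), "")
--             if "/tests/" in filepath or "/test_" in filepath or filepath.startswith("tests/"):
--                 continue
--         kept.extend(b)
--     cleaned = "\n".join(kept).strip()
--     if cleaned and not cleaned.endswith("\n"):
--         cleaned += "\n"
--     return cleaned
-- ===== Notes on version B (the rewrite author's own statement) =====
-- stated objective: alternative
-- what changed: Replaces the index-driven while loop with an in_test_hunk flag and lookahead index-line handling by a two-phase block decomposition: split the lines into a preamble plus one block per 'diff --git a/' header, then keep exactly the non-test blocks and flatten.
import Mathlib
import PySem

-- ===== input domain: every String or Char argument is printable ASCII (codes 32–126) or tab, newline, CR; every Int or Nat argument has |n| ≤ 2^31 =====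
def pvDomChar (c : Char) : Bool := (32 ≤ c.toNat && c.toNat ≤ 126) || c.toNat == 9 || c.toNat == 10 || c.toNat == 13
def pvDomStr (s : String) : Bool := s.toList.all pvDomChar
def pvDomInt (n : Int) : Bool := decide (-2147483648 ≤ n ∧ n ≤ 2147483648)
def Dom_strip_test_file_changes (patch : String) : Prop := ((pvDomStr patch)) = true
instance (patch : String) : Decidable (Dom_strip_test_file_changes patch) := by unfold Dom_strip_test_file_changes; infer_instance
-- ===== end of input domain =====

-- B restructures A's index-driven while loop (with its in_test_hunk flag and lookahead for the
-- 'index ' line) into a two-phase block decomposition: split the lines into header-delimited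
-- blocks, drop the test-file blocks, flatten.

-- ===== PORT A =====

-- patch.split("\n"): separator is the non-empty literal "\n", so split? is always some
def pvLines (patch : String) : List String := (PySem.Str.split? patch "\n").getD []

-- A's 'for j, part in enumerate(parts): if part.startswith("b/"): filepath = part[2:]; break' loop
def pvFindB : List String → String
  | [] => ""
  | p :: ps => if PySem.Str.startswith p "b/" then PySem.Str.slice p (some 2) none else pvFindB ps

-- A's in_test_hunk test on a header line
def pvIsTestHeader (l : String) : Bool :=
  let filepath := pvFindB (PySem.Str.split₀ l)
  PySem.Str.isIn "/tests/" filepath || PySem.Str.isIn "/test_" filepath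
    || PySem.Str.startswith filepath "tests/"

-- A's while loop over lines with state in_test_hunk; the 'i += 1 … continue' steps become the
-- recursion, the conditional extra 'i += 1' for a following 'index ' line is the lookahead
-- pattern l :: l2 :: rest2
def pvLoopA : List String → Bool → List String
  | [], _ => []
  | [l], inTest =>
    if PySem.Str.startswith l "diff --git a/" then
      if pvIsTestHeader l = true then [] else [l]
    else
      if inTest = true then [] else [l]
  | l :: l2 :: rest2, inTest =>
    if PySem.Str.startswith l "diff --git a/" then
      let t := pvIsTestHeader l
      let head := if t = true then [] else [l]
      if PySem.Str.startswith l2 "index " then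
        head ++ (if t = true then [] else [l2]) ++ pvLoopA rest2 t
      else
        head ++ pvLoopA (l2 :: rest2) t
    else
      (if inTest = true then [] else [l]) ++ pvLoopA (l2 :: rest2) inTest
termination_by lines _ => lines.length

-- shared final normalization (identical code in both Pythons)
def pvFinish (result : List String) : String :=
  let cleaned := PySem.Str.strip (PySem.Str.join "\n" result)
  if cleaned ≠ "" && !PySem.Str.endswith cleaned "\n" then PySem.Str.join "" [cleaned, "\n"]
  else cleaned

def strip_test_file_changes (patch : String) : String :=
  if patch = "" ∨ PySem.Str.strip patch = "" then patch
  else pvFinish (pvLoopA (pvLines patch) false)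

-- ===== PORT B =====

-- B's first loop: accumulate (blocks, cur)
def pvStepB (st : List (List String) × List String) (line : String) :
    List (List String) × List String :=
  if PySem.Str.startswith line "diff --git a/" then (st.1 ++ [st.2], [line])
  else (st.1, st.2 ++ [line])

-- B's 'next((p[2:] for p in b[0].split() if p.startswith("b/")), "")'
def pvPathB (l : String) : String :=
  (((PySem.Str.split₀ l).find? (fun p => PySem.Str.startswith p "b/")).map
    (fun p => PySem.Str.slice p (some 2) none)).getD ""

-- B's 'continue' test: is this block a test-file block?
def pvDropBlock (b : List String) : Bool :=
  match b with
  | [] => false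
  | l :: _ =>
    if PySem.Str.startswith l "diff --git a/" then
      let filepath := pvPathB l
      PySem.Str.isIn "/tests/" filepath || PySem.Str.isIn "/test_" filepath
        || PySem.Str.startswith filepath "tests/"
    else false

def strip_test_file_changes_alt (patch : String) : String :=
  if patch = "" ∨ PySem.Str.strip patch = "" then patch
  else
    let lines := pvLines patch
    let st := lines.foldl pvStepB ([], [])
    let blocks := st.1 ++ [st.2]
    let kept := blocks.foldl (fun acc b => if pvDropBlock b then acc else acc ++ b) []
    pvFinish kept

-- ===== PRECONDITION & SPEC =====
def Spec_strip_test_file_changes (patch : String) (out : String) : Prop := out = strip_test_file_changes_alt patch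
instance (patch : String) (out : String) : Decidable (Spec_strip_test_file_changes patch out) := by unfold Spec_strip_test_file_changes; infer_instance

-- ===== CLAIM (what is proved, stated in full; the proofs are below) =====
def Claim_equal_strip_test_file_changes : Prop := ∀ (patch : String), Dom_strip_test_file_changes patch → Spec_strip_test_file_changes patch (strip_test_file_changes patch)

-- ===== LEMMAS AND PROOFS =====

-- A without its redundant 'index ' lookahead: keep a line iff the current block is not a test block
def pvSimpleA : List String → Bool → List String
  | [], _ => []
  | l :: rest, inTest =>
    if PySem.Str.startswith l "diff --git a/" then
      (if pvIsTestHeader l = true then [] else [l]) ++ pvSimpleA rest (pvIsTestHeader l)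
    else
      (if inTest = true then [] else [l]) ++ pvSimpleA rest inTest

-- a line starting with "index " does not start with "diff --git a/"
theorem pvIndexNotHeader (l : String) (h : PySem.Str.startswith l "index " = true) :
    ¬ PySem.Str.startswith l "diff --git a/" = true := by
  simp only [PySem.Str.startswith_eq] at *
  rw [PySem.Chars.startswith_iff] at h
  rw [PySem.Chars.startswith_iff]
  obtain ⟨t, ht⟩ := h
  intro hc
  obtain ⟨u, hu⟩ := hc
  rw [← ht] at hu
  simp at hu

theorem pvLoopA_eq_simple : ∀ n lines, lines.length ≤ n → ∀ t, pvLoopA lines t = pvSimpleA lines t := by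
  intro n
  induction n with
  | zero =>
    intro lines h t
    match lines with
    | [] => simp [pvLoopA, pvSimpleA]
    | _ :: _ => simp at h
  | succ n ih =>
    intro lines h t
    match lines with
    | [] => simp [pvLoopA, pvSimpleA]
    | [l] =>
      simp only [pvLoopA, pvSimpleA, List.append_nil]
    | l :: l2 :: rest2 =>
      by_cases hl : PySem.Str.startswith l "diff --git a/" = true
      · by_cases h2 : PySem.Str.startswith l2 "index " = true
        · have hnh := pvIndexNotHeader l2 h2
          simp only [pvLoopA, pvSimpleA]
          simp only [if_pos hl, if_pos h2, if_neg hnh]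
          rw [ih rest2 (by simp at h ⊢; omega)]
          simp [List.append_assoc]
        · simp only [pvLoopA]
          simp only [if_pos hl, if_neg h2]
          rw [ih (l2 :: rest2) (by simp at h ⊢; omega)]
          simp only [pvSimpleA]
          simp only [if_pos hl]
      · simp only [pvLoopA]
        simp only [if_neg hl]
        rw [ih (l2 :: rest2) (by simp at h ⊢; omega)]
        simp only [pvSimpleA]
        simp only [if_neg hl]

-- the paths computed by A's break-loop and B's find? agree
theorem pvPath_eq (l : String) : pvPathB l = pvFindB (PySem.Str.split₀ l) := by
  unfold pvPathB
  generalize PySem.Str.split₀ l = parts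
  induction parts with
  | nil => rfl
  | cons p ps ih =>
    simp only [List.find?, pvFindB]
    by_cases hp : PySem.Str.startswith p "b/" = true
    · rw [if_pos hp, hp]
      rfl
    · rw [if_neg hp]
      rw [Bool.not_eq_true] at hp
      rw [hp]
      exact ih

theorem pvDrop_header (l : String) (hl : PySem.Str.startswith l "diff --git a/" = true)
    (b : List String) : pvDropBlock (l :: b) = pvIsTestHeader l := by
  simp only [pvDropBlock, pvIsTestHeader, pvPath_eq]
  rw [if_pos hl]

-- blocksAux: the recursive form of B's first loop
def pvBlocksAux : List String → List String → List (List String)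
  | cur, [] => [cur]
  | cur, x :: xs =>
    if PySem.Str.startswith x "diff --git a/" then cur :: pvBlocksAux [x] xs
    else pvBlocksAux (cur ++ [x]) xs

theorem pvFoldl_blocks (lines : List String) : ∀ bs cur,
    (lines.foldl pvStepB (bs, cur)).1 ++ [(lines.foldl pvStepB (bs, cur)).2]
      = bs ++ pvBlocksAux cur lines := by
  induction lines with
  | nil => intro bs cur; simp [pvBlocksAux]
  | cons x xs ih =>
    intro bs cur
    simp only [List.foldl_cons, pvStepB, pvBlocksAux]
    by_cases hx : PySem.Str.startswith x "diff --git a/" = true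
    · rw [if_pos hx, if_pos hx, ih]
      simp
    · rw [if_neg hx, if_neg hx, ih]

-- B's second loop is acc ++ flatten of the kept blocks
theorem pvFoldl_keep (blocks : List (List String)) : ∀ acc,
    blocks.foldl (fun acc b => if pvDropBlock b then acc else acc ++ b) acc
      = acc ++ (blocks.filter (fun b => !pvDropBlock b)).flatten := by
  induction blocks with
  | nil => intro acc; simp
  | cons b bs ih =>
    intro acc
    simp only [List.foldl_cons, List.filter_cons]
    by_cases hb : pvDropBlock b = true
    · rw [if_pos hb, ih]
      simp [hb]
    · rw [if_neg hb, ih (acc ++ b)]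
      rw [Bool.not_eq_true] at hb
      simp [hb]

-- the test-flag of a block depends only on its head
theorem pvDrop_append (c : String) (cs : List String) (x : String) :
    pvDropBlock ((c :: cs) ++ [x]) = pvDropBlock (c :: cs) := by
  simp only [List.cons_append, pvDropBlock]

-- main invariant: kept-flatten of blocksAux vs pvSimpleA
theorem pvMain (lines : List String) : ∀ cur,
    ((pvBlocksAux cur lines).filter (fun b => !pvDropBlock b)).flatten
      = (if pvDropBlock cur = true then [] else cur) ++ pvSimpleA lines (pvDropBlock cur) := by
  induction lines with
  | nil =>
    intro cur
    simp only [pvBlocksAux, pvSimpleA, List.filter]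
    by_cases h : pvDropBlock cur = true <;> simp [h]
  | cons x xs ih =>
    intro cur
    by_cases hx : PySem.Str.startswith x "diff --git a/" = true
    · have h1 : pvDropBlock [x] = pvIsTestHeader x := pvDrop_header x hx []
      have e1 : pvBlocksAux cur (x :: xs) = cur :: pvBlocksAux [x] xs := by
        simp only [pvBlocksAux]; rw [if_pos hx]
      have e2 : pvSimpleA (x :: xs) (pvDropBlock cur)
          = (if pvIsTestHeader x = true then [] else [x]) ++ pvSimpleA xs (pvIsTestHeader x) := by
        simp only [pvSimpleA]; rw [if_pos hx]
      rw [e1, e2, List.filter_cons]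
      by_cases hc : pvDropBlock cur = true
      · rw [if_neg (by simp [hc]), ih [x], h1, hc]
        simp
      · rw [if_pos (by simp [Bool.not_eq_true] at hc ⊢; exact hc)]
        rw [Bool.not_eq_true] at hc
        simp only [List.flatten_cons, ih [x], h1, hc]
        simp
    · have e1 : pvBlocksAux cur (x :: xs) = pvBlocksAux (cur ++ [x]) xs := by
        simp only [pvBlocksAux]; rw [if_neg hx]
      have e2 : pvSimpleA (x :: xs) (pvDropBlock cur)
          = (if pvDropBlock cur = true then [] else [x]) ++ pvSimpleA xs (pvDropBlock cur) := by
        simp only [pvSimpleA]; rw [if_neg hx]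
      rw [e1, e2, ih (cur ++ [x])]
      match cur with
      | [] =>
        have h0 : pvDropBlock ([] ++ [x]) = false := by
          simp only [List.nil_append, pvDropBlock]
          rw [if_neg hx]
        rw [h0]
        simp [pvDropBlock]
      | c :: cs =>
        rw [pvDrop_append c cs x]
        by_cases hc : pvDropBlock (c :: cs) = true
        · rw [hc]; simp
        · rw [Bool.not_eq_true] at hc
          rw [hc]; simp

-- the two result lists agree
theorem pvLists (lines : List String) :
    pvLoopA lines false =
      ((lines.foldl pvStepB ([], [])).1 ++ [(lines.foldl pvStepB ([], [])).2]).foldl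
        (fun acc b => if pvDropBlock b then acc else acc ++ b) [] := by
  rw [pvLoopA_eq_simple lines.length _ le_rfl, pvFoldl_keep]
  have hb := pvFoldl_blocks lines [] []
  simp only [List.nil_append] at hb
  rw [hb, pvMain]
  simp [pvDropBlock]

-- ===== VERDICT (by name: the statement is the Claim_ definition above) =====
theorem strip_test_file_changes_spec : Claim_equal_strip_test_file_changes := by
  intro patch _
  unfold Spec_strip_test_file_changes strip_test_file_changes strip_test_file_changes_alt
  by_cases h : patch = "" ∨ PySem.Str.strip patch = ""
  · rw [if_pos h, if_pos h]
  · rw [if_neg h, if_neg h]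
    exact congrArg pvFinish (pvLists (pvLines patch))
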